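-- pv_equiv track=rewrite | github.com/bettyp23/CodePathTIP | Unit2/Session2.py | get_highest_priority_task
-- ===== SOURCE A (Python) =====
-- def get_highest_priority_task(tasks):
--     if not tasks:
--         return None
--     highest_priority = max(tasks.values())
--     highest_task = None
--     for task, priority in tasks.items():
--         if priority == highest_priority:
--             if highest_task is None or task < highest_task:
--                 highest_task = task
--     tasks.pop(highest_task)
--     return highest_task
-- ===== SOURCE B (Python) =====
-- def get_highest_priority_task(tasks):
--     if not tasks:
--         return None
--     best_task = None
--     best_priority = None
--     for task, priority in tasks.items():
--         if best_task is None or priority > best_priority or (priority == best_priority and task < best_task):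
--             best_task = task
--             best_priority = priority
--     tasks.pop(best_task)
--     return best_task
-- ===== Notes on version B (the rewrite author's own statement) =====
-- stated objective: simpler
-- what changed: Replaces A's two sequential scans (max of all values, then a scan for the lex-smallest task at that priority) by a single pass maintaining a running (best_task, best_priority) pair.
import Mathlib
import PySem

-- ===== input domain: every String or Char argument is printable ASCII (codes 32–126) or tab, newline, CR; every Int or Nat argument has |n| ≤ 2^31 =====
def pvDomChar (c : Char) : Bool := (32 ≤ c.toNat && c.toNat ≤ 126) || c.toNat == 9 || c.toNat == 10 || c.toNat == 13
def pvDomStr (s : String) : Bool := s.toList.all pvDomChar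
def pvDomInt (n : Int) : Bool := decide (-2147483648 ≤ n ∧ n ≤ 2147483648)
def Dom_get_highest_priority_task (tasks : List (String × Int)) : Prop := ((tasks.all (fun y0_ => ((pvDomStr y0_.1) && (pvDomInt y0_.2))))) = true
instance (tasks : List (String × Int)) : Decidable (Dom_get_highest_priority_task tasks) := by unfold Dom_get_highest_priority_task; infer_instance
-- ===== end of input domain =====

-- B replaces A's two scans (max of values, then scan for the lex-smallest task at that
-- priority) by one pass with a running best; same return value (and same pop mutation in Python).


-- ===== PORT A =====
-- step of A's for-loop: keep the lex-smallest task whose priority equals hp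
def pvStepA (hp : Int) (ht : Option String) (tp : String × Int) : Option String :=
  if tp.2 = hp then
    match ht with
    | none => some tp.1
    | some h => if tp.1 < h then some tp.1 else ht
  else ht

def get_highest_priority_task (tasks : List (String × Int)) : Option String :=
  if tasks = [] then none
  else
    match PySem.List.max? (tasks.map Prod.snd) (fun v => v) with
    | none => none  -- unreachable: tasks ≠ []
    | some hp => tasks.foldl (pvStepA hp) none

-- ===== PORT B =====
-- step of B's single pass: update the running best (task, priority)
def pvStepB (b : Option (String × Int)) (tp : String × Int) : Option (String × Int) :=
  match b with
  | none => some tp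
  | some (bt, bp) =>
    if bp < tp.2 ∨ (tp.2 = bp ∧ tp.1 < bt) then some tp else some (bt, bp)

def get_highest_priority_task_alt (tasks : List (String × Int)) : Option String :=
  if tasks = [] then none
  else
    match tasks.foldl pvStepB none with
    | none => none  -- unreachable: tasks ≠ []
    | some (bt, _) => some bt

-- ===== PRECONDITION & SPEC =====
def Spec_get_highest_priority_task (tasks : List (String × Int)) (out : Option String) : Prop := out = get_highest_priority_task_alt tasks
instance (tasks : List (String × Int)) (out : Option String) : Decidable (Spec_get_highest_priority_task tasks out) := by unfold Spec_get_highest_priority_task; infer_instance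

-- ===== CLAIM (what is proved, stated in full; the proofs are below) =====
def Claim_equal_get_highest_priority_task : Prop := ∀ (tasks : List (String × Int)), Dom_get_highest_priority_task tasks → Spec_get_highest_priority_task tasks (get_highest_priority_task tasks)

-- ===== LEMMAS AND PROOFS =====

-- total version of B's running best, once the state is some
def pvPick (b tp : String × Int) : String × Int :=
  if b.2 < tp.2 ∨ (tp.2 = b.2 ∧ tp.1 < b.1) then tp else b

lemma pvPick_pos (b tp : String × Int) (h : b.2 < tp.2 ∨ (tp.2 = b.2 ∧ tp.1 < b.1)) :
    pvPick b tp = tp := by unfold pvPick; exact if_pos h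

lemma pvPick_neg (b tp : String × Int) (h : ¬ (b.2 < tp.2 ∨ (tp.2 = b.2 ∧ tp.1 < b.1))) :
    pvPick b tp = b := by unfold pvPick; exact if_neg h

lemma pvStepB_some (b tp : String × Int) : pvStepB (some b) tp = some (pvPick b tp) := by
  cases b with
  | mk bt bp =>
    show (if (bp < tp.2 ∨ (tp.2 = bp ∧ tp.1 < bt)) then some tp else some (bt, bp)) = _
    unfold pvPick
    exact (apply_ite some _ _ _).symm

lemma foldB_some (xs : List (String × Int)) (b : String × Int) :
    xs.foldl pvStepB (some b) = some (xs.foldl pvPick b) := by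
  induction xs generalizing b with
  | nil => rfl
  | cons y ys ih => simp [List.foldl_cons, pvStepB_some, ih]

lemma pvPick_snd (b tp : String × Int) : (pvPick b tp).2 = max b.2 tp.2 := by
  unfold pvPick; split_ifs with h
  · rcases h with h | h
    · omega
    · omega
  · have h1 : ¬ b.2 < tp.2 := fun hh => h (Or.inl hh)
    omega

lemma pvPick_snd_max (xs : List (String × Int)) (x : String × Int) :
    (xs.foldl pvPick x).2 = (xs.map Prod.snd).foldl max x.2 := by
  induction xs generalizing x with
  | nil => rfl
  | cons y ys ih => simp [List.foldl_cons, ih, pvPick_snd]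

lemma pvPick_seed_le (xs : List (String × Int)) (x : String × Int) :
    x.2 ≤ (xs.foldl pvPick x).2 := by
  induction xs generalizing x with
  | nil => exact le_refl _
  | cons y ys ih =>
    rw [List.foldl_cons]
    refine le_trans ?_ (ih (pvPick x y))
    rw [pvPick_snd]; omega

lemma pvPick_bound (xs : List (String × Int)) (x e : String × Int) (he : e ∈ x :: xs) :
    e.2 ≤ (xs.foldl pvPick x).2 := by
  induction xs generalizing x with
  | nil => simp_all
  | cons y ys ih =>
    have hb : x.2 ≤ (pvPick x y).2 ∧ y.2 ≤ (pvPick x y).2 := by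
      rw [pvPick_snd]; omega
    rw [List.foldl_cons]
    rcases List.mem_cons.mp he with rfl | he2
    · exact le_trans hb.1 (pvPick_seed_le ys _)
    · rcases List.mem_cons.mp he2 with rfl | he3
      · exact le_trans hb.2 (pvPick_seed_le ys _)
      · exact ih _ (List.mem_cons_of_mem _ he3)

lemma foldA_none (hp : Int) (l : List (String × Int)) (h : ∀ e ∈ l, e.2 ≠ hp) :
    l.foldl (pvStepA hp) none = none := by
  induction l with
  | nil => rfl
  | cons y ys ih =>
    have hy := h y List.mem_cons_self
    simp only [List.foldl_cons, pvStepA, if_neg hy]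
    exact ih (fun e he => h e (List.mem_cons_of_mem _ he))

-- core: A's fold with hp = (best of B).2 returns (best of B).1
lemma foldA_eq (x : String × Int) (xs : List (String × Int)) :
    (x :: xs).foldl (pvStepA ((xs.foldl pvPick x).2)) none = some ((xs.foldl pvPick x).1) := by
  induction xs using List.reverseRecOn with
  | nil => simp [pvStepA]
  | append_singleton ys y ih =>
    have hsplit : (x :: (ys ++ [y])) = (x :: ys) ++ [y] := by simp
    rw [hsplit]
    repeat rw [List.foldl_concat]
    by_cases h1 : (ys.foldl pvPick x).2 < y.2
    · -- new strict max: the old scan finds nothing, y wins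
      rw [pvPick_pos _ _ (Or.inl h1)]
      have hnone : (x :: ys).foldl (pvStepA y.2) none = none := by
        apply foldA_none
        intro e he
        have := pvPick_bound ys x e he
        omega
      rw [hnone]
      simp [pvStepA]
    · by_cases h2 : y.2 = (ys.foldl pvPick x).2 ∧ y.1 < (ys.foldl pvPick x).1
      · rw [pvPick_pos _ _ (Or.inr h2), h2.1, ih]
        simp [pvStepA, h2.1, h2.2]
      · rw [pvPick_neg _ _ (fun hc => hc.elim h1 h2), ih]
        by_cases h3 : y.2 = (ys.foldl pvPick x).2
        · have h4 : ¬ y.1 < (ys.foldl pvPick x).1 := fun hc => h2 ⟨h3, hc⟩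
          simp [pvStepA, h3, h4]
        · simp [pvStepA, h3]

-- ===== VERDICT (by name: the statement is the Claim_ definition above) =====
theorem get_highest_priority_task_spec : Claim_equal_get_highest_priority_task := by
  intro tasks _
  unfold Spec_get_highest_priority_task get_highest_priority_task get_highest_priority_task_alt
  cases tasks with
  | nil => rfl
  | cons x xs =>
    simp only [if_neg (List.cons_ne_nil x xs), List.map_cons]
    rw [PySem.List.max?_id_cons, ← pvPick_snd_max]
    have hB : List.foldl pvStepB none (x :: xs) = some (xs.foldl pvPick x) := by
      rw [List.foldl_cons]
      exact foldB_some xs x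
    rw [hB]
    show List.foldl (pvStepA ((xs.foldl pvPick x).2)) none (x :: xs) = _
    rw [foldA_eq]
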